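-- pv_equiv track=rewrite | github.com/turbomam/nmdc-mcp | main.py | identify_class_category
-- ===== SOURCE A (Python) =====
-- def identify_class_category(name: str, description: str) -> str:
--     """Identify the category/type of a class based on name and description using dynamic patterns."""
--     name_lower = name.lower()
--     desc_lower = description.lower()
--
--     # Dynamic pattern detection - build patterns from common word roots
--     bio_patterns = [word for word in ['sample', 'specimen'] if word in name_lower or word in desc_lower]
--     study_patterns = [word for word in ['study', 'project', 'investigation'] if
--                       word in name_lower or word in desc_lower]
--     data_patterns = [word for word in ['data', 'file', 'object'] if word in name_lower or word in desc_lower]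
--     workflow_patterns = [word for word in ['workflow', 'execution', 'activity', 'process'] if
--                          word in name_lower or word in desc_lower]
--     annotation_patterns = [word for word in ['annotation', 'feature'] if word in name_lower or word in desc_lower]
--     person_patterns = [word for word in ['person', 'user', 'contact'] if word in name_lower or word in desc_lower]
--     instrument_patterns = [word for word in ['instrument', 'device', 'equipment'] if
--                            word in name_lower or word in desc_lower]
--
--     # Return category based on which patterns match
--     if bio_patterns or 'biosample' in name_lower:
--         return "biological_sample"
--     elif study_patterns:
--         return "study"
--     elif 'organism' in name_lower or 'taxa' in name_lower or 'species' in name_lower: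
--         return "organism"
--     elif data_patterns:
--         return "data_object"
--     elif workflow_patterns:
--         return "workflow"
--     elif annotation_patterns:
--         return "annotation"
--     elif person_patterns:
--         return "person"
--     elif instrument_patterns:
--         return "instrument"
--     elif 'protocol' in name_lower or 'method' in name_lower or 'procedure' in name_lower:
--         return "protocol"
--
--     return "unknown"
-- ===== SOURCE B (Python) =====
-- # Flat keyword map + single arg-min pass: every keyword carries a priority and
-- # a category; we scan the whole map once, keeping the lowest-priority match,
-- # instead of building per-category pattern lists and cascading through if/elif.
-- _KEYWORDS = {
--     "sample": (0, "biological_sample", False),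
--     "specimen": (0, "biological_sample", False),
--     "biosample": (0, "biological_sample", True),
--     "study": (1, "study", False),
--     "project": (1, "study", False),
--     "investigation": (1, "study", False),
--     "organism": (2, "organism", True),
--     "taxa": (2, "organism", True),
--     "species": (2, "organism", True),
--     "data": (3, "data_object", False),
--     "file": (3, "data_object", False),
--     "object": (3, "data_object", False),
--     "workflow": (4, "workflow", False),
--     "execution": (4, "workflow", False),
--     "activity": (4, "workflow", False),
--     "process": (4, "workflow", False),
--     "annotation": (5, "annotation", False),
--     "feature": (5, "annotation", False),
--     "person": (6, "person", False),
--     "user": (6, "person", False),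
--     "contact": (6, "person", False),
--     "instrument": (7, "instrument", False),
--     "device": (7, "instrument", False),
--     "equipment": (7, "instrument", False),
--     "protocol": (8, "protocol", True),
--     "method": (8, "protocol", True),
--     "procedure": (8, "protocol", True),
-- }
--
--
-- def identify_class_category(name: str, description: str) -> str:
--     name_lower = name.lower()
--     desc_lower = description.lower()
--     best = None
--     for word, (prio, cat, name_only) in _KEYWORDS.items():
--         matched = word in name_lower or (not name_only and word in desc_lower)
--         if matched and (best is None or prio < best[0]):
--             best = (prio, cat)
--     return best[1] if best is not None else "unknown"
-- ===== Notes on version B (the rewrite author's own statement) =====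
-- stated objective: alternative
-- what changed: Replaces the seven eagerly-built per-category pattern lists and nine-branch if/elif cascade with a flat keyword->(priority,category) map scanned in one pass keeping the minimum-priority match (arg-min accumulator, no cascade, no early return).
import Mathlib
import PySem

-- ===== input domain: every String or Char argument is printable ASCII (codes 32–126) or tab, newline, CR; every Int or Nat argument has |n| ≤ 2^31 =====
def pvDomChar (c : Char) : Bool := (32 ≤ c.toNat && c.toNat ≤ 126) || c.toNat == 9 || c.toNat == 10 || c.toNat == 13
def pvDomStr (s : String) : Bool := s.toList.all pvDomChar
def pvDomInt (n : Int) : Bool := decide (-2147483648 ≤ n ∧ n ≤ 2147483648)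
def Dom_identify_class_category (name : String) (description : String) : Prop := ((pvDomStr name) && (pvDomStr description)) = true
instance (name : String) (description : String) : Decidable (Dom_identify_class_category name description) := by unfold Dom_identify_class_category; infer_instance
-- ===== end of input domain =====

-- B replaces A's per-category pattern lists and if/elif cascade with a flat
-- keyword->(priority,category) map scanned once keeping the minimum-priority
-- match (objective: alternative, same cost).

-- ===== PORT A =====
def identify_class_category (name : String) (description : String) : String :=
  let name_lower := PySem.Str.lower name
  let desc_lower := PySem.Str.lower description
  let inEither := fun (w : String) => PySem.Str.isIn w name_lower || PySem.Str.isIn w desc_lower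
  let bio_patterns := (["sample", "specimen"]).filter inEither
  let study_patterns := (["study", "project", "investigation"]).filter inEither
  let data_patterns := (["data", "file", "object"]).filter inEither
  let workflow_patterns := (["workflow", "execution", "activity", "process"]).filter inEither
  let annotation_patterns := (["annotation", "feature"]).filter inEither
  let person_patterns := (["person", "user", "contact"]).filter inEither
  let instrument_patterns := (["instrument", "device", "equipment"]).filter inEither
  if !bio_patterns.isEmpty || PySem.Str.isIn "biosample" name_lower then "biological_sample"
  else if !study_patterns.isEmpty then "study"
  else if PySem.Str.isIn "organism" name_lower || PySem.Str.isIn "taxa" name_lower || PySem.Str.isIn "species" name_lower then "organism"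
  else if !data_patterns.isEmpty then "data_object"
  else if !workflow_patterns.isEmpty then "workflow"
  else if !annotation_patterns.isEmpty then "annotation"
  else if !person_patterns.isEmpty then "person"
  else if !instrument_patterns.isEmpty then "instrument"
  else if PySem.Str.isIn "protocol" name_lower || PySem.Str.isIn "method" name_lower || PySem.Str.isIn "procedure" name_lower then "protocol"
  else "unknown"

-- ===== PORT B =====
-- flat keyword map: (word, priority, category, name_only), in Source B's insertion order
def pvKeywords : List (String × Nat × String × Bool) :=
  [("sample", 0, "biological_sample", false),
   ("specimen", 0, "biological_sample", false),
   ("biosample", 0, "biological_sample", true),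
   ("study", 1, "study", false),
   ("project", 1, "study", false),
   ("investigation", 1, "study", false),
   ("organism", 2, "organism", true),
   ("taxa", 2, "organism", true),
   ("species", 2, "organism", true),
   ("data", 3, "data_object", false),
   ("file", 3, "data_object", false),
   ("object", 3, "data_object", false),
   ("workflow", 4, "workflow", false),
   ("execution", 4, "workflow", false),
   ("activity", 4, "workflow", false),
   ("process", 4, "workflow", false),
   ("annotation", 5, "annotation", false),
   ("feature", 5, "annotation", false),
   ("person", 6, "person", false),
   ("user", 6, "person", false),
   ("contact", 6, "person", false),
   ("instrument", 7, "instrument", false),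
   ("device", 7, "instrument", false),
   ("equipment", 7, "instrument", false),
   ("protocol", 8, "protocol", true),
   ("method", 8, "protocol", true),
   ("procedure", 8, "protocol", true)]

def identify_class_category_alt (name : String) (description : String) : String :=
  let name_lower := PySem.Str.lower name
  let desc_lower := PySem.Str.lower description
  let best := pvKeywords.foldl
    (fun (best : Option (Nat × String)) e =>
      let matched := PySem.Str.isIn e.1 name_lower || (!e.2.2.2 && PySem.Str.isIn e.1 desc_lower)
      if matched && (match best with | none => true | some (p, _) => decide (e.2.1 < p)) then
        some (e.2.1, e.2.2.1)
      else best) none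
  match best with
  | some (_, c) => c
  | none => "unknown"

-- ===== PRECONDITION & SPEC =====
def Spec_identify_class_category (name : String) (description : String) (out : String) : Prop := out = identify_class_category_alt name description
instance (name : String) (description : String) (out : String) : Decidable (Spec_identify_class_category name description out) := by unfold Spec_identify_class_category; infer_instance

-- ===== CLAIM (what is proved, stated in full; the proofs are below) =====
def Claim_equal_identify_class_category : Prop := ∀ (name : String) (description : String), Dom_identify_class_category name description → Spec_identify_class_category name description (identify_class_category name description)

-- ===== LEMMAS AND PROOFS =====
theorem pv_filter_nonempty_eq_any {α : Type} (p : α → Bool) (l : List α) :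
    (!(l.filter p).isEmpty) = l.any p := by
  induction l with
  | nil => rfl
  | cons a t ih =>
    by_cases h : p a = true <;> simp [h, ih]

theorem pv_cond_or {α : Type} (a b : Bool) (x y : α) :
    (if (a || b) then x else y) = if a then x else if b then x else y := by
  cases a <;> simp

-- once a best with priority p is held, entries of priority ≥ p never replace it
theorem pv_fold_stay {α : Type} (M : α → Bool) (prio : α → Nat) (cat : α → String)
    (p : Nat) (c : String) (l : List α) (h : ∀ e ∈ l, p ≤ prio e) :
    l.foldl
      (fun (best : Option (Nat × String)) e =>
        if M e && (match best with | none => true | some (q, _) => decide (prio e < q)) then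
          some (prio e, cat e)
        else best) (some (p, c)) = some (p, c) := by
  induction l with
  | nil => rfl
  | cons e t ih =>
    have hd : ¬ (prio e < p) := Nat.not_lt.mpr (h e (List.mem_cons_self ..))
    simp only [List.foldl_cons, decide_eq_false hd, Bool.and_false, if_false]
    exact ih (fun e' he' => h e' (List.mem_cons_of_mem _ he'))

-- on a priority-sorted list the arg-min fold returns the first matching entry
theorem pv_fold_none {α : Type} (M : α → Bool) (prio : α → Nat) (cat : α → String)
    (l : List α) (h : List.Pairwise (fun a b => prio a ≤ prio b) l) :
    l.foldl
      (fun (best : Option (Nat × String)) e =>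
        if M e && (match best with | none => true | some (q, _) => decide (prio e < q)) then
          some (prio e, cat e)
        else best) none
    = (l.find? M).map (fun e => (prio e, cat e)) := by
  induction l with
  | nil => rfl
  | cons e t ih =>
    rcases List.pairwise_cons.mp h with ⟨hle, ht⟩
    by_cases hm : M e = true
    · simp only [List.foldl_cons, List.find?_cons_of_pos hm, hm, Bool.true_and, if_true,
        Option.map_some]
      exact pv_fold_stay M prio cat (prio e) (cat e) t hle
    · simp only [List.foldl_cons, List.find?_cons_of_neg (by simpa using hm),
        Bool.not_eq_true] at *
      simp only [hm, Bool.false_and, if_neg, Bool.false_eq_true, not_false_iff]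
      exact ih ht

theorem pv_sorted : List.Pairwise (fun (a b : String × Nat × String × Bool) => a.2.1 ≤ b.2.1) pvKeywords := by
  decide

set_option maxRecDepth 10000 in
set_option maxHeartbeats 1000000 in
-- ===== VERDICT (by name: the statement is the Claim_ definition above) =====
theorem identify_class_category_spec : Claim_equal_identify_class_category := by
  intro name description _
  unfold Spec_identify_class_category identify_class_category identify_class_category_alt
  have hfold :=
    pv_fold_none
      (fun (e : String × Nat × String × Bool) =>
        PySem.Str.isIn e.1 (PySem.Str.lower name) ||
          (!e.2.2.2 && PySem.Str.isIn e.1 (PySem.Str.lower description)))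
      (fun e => e.2.1) (fun e => e.2.2.1) pvKeywords pv_sorted
  simp only [] at hfold ⊢
  rw [hfold]
  simp only [pvKeywords, List.find?_cons, List.find?_nil, Bool.not_true, Bool.not_false,
    Bool.true_and, Bool.false_and, Bool.or_false]
  simp only [pv_filter_nonempty_eq_any, List.any_cons, List.any_nil, Bool.or_false,
    Bool.or_assoc, pv_cond_or]
  by_cases h0 : (PySem.Str.isIn "sample" (PySem.Str.lower name) || PySem.Str.isIn "sample" (PySem.Str.lower description)) = true
  · simp only [h0, Option.map_some]
    rcases Bool.or_eq_true_iff.mp h0 with h' | h' <;> simp only [h', if_true, ite_self]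
  rw [Bool.not_eq_true, Bool.or_eq_false_iff] at h0
  simp only [h0.1, h0.2, Bool.false_eq_true, if_false, Bool.false_or]
  by_cases h1 : (PySem.Str.isIn "specimen" (PySem.Str.lower name) || PySem.Str.isIn "specimen" (PySem.Str.lower description)) = true
  · simp only [h1, Option.map_some]
    rcases Bool.or_eq_true_iff.mp h1 with h' | h' <;> simp only [h', if_true, ite_self]
  rw [Bool.not_eq_true, Bool.or_eq_false_iff] at h1
  simp only [h1.1, h1.2, Bool.false_eq_true, if_false, Bool.false_or]
  by_cases h2 : PySem.Str.isIn "biosample" (PySem.Str.lower name) = true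
  · simp only [h2, if_true, Option.map_some]
  rw [Bool.not_eq_true] at h2
  simp only [h2, Bool.false_eq_true, if_false, Bool.false_or]
  by_cases h3 : (PySem.Str.isIn "study" (PySem.Str.lower name) || PySem.Str.isIn "study" (PySem.Str.lower description)) = true
  · simp only [h3, Option.map_some]
    rcases Bool.or_eq_true_iff.mp h3 with h' | h' <;> simp only [h', if_true, ite_self]
  rw [Bool.not_eq_true, Bool.or_eq_false_iff] at h3
  simp only [h3.1, h3.2, Bool.false_eq_true, if_false, Bool.false_or]
  by_cases h4 : (PySem.Str.isIn "project" (PySem.Str.lower name) || PySem.Str.isIn "project" (PySem.Str.lower description)) = true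
  · simp only [h4, Option.map_some]
    rcases Bool.or_eq_true_iff.mp h4 with h' | h' <;> simp only [h', if_true, ite_self]
  rw [Bool.not_eq_true, Bool.or_eq_false_iff] at h4
  simp only [h4.1, h4.2, Bool.false_eq_true, if_false, Bool.false_or]
  by_cases h5 : (PySem.Str.isIn "investigation" (PySem.Str.lower name) || PySem.Str.isIn "investigation" (PySem.Str.lower description)) = true
  · simp only [h5, Option.map_some]
    rcases Bool.or_eq_true_iff.mp h5 with h' | h' <;> simp only [h', if_true, ite_self]
  rw [Bool.not_eq_true, Bool.or_eq_false_iff] at h5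
  simp only [h5.1, h5.2, Bool.false_eq_true, if_false, Bool.false_or]
  by_cases h6 : PySem.Str.isIn "organism" (PySem.Str.lower name) = true
  · simp only [h6, if_true, Option.map_some]
  rw [Bool.not_eq_true] at h6
  simp only [h6, Bool.false_eq_true, if_false, Bool.false_or]
  by_cases h7 : PySem.Str.isIn "taxa" (PySem.Str.lower name) = true
  · simp only [h7, if_true, Option.map_some]
  rw [Bool.not_eq_true] at h7
  simp only [h7, Bool.false_eq_true, if_false, Bool.false_or]
  by_cases h8 : PySem.Str.isIn "species" (PySem.Str.lower name) = true
  · simp only [h8, if_true, Option.map_some]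
  rw [Bool.not_eq_true] at h8
  simp only [h8, Bool.false_eq_true, if_false, Bool.false_or]
  by_cases h9 : (PySem.Str.isIn "data" (PySem.Str.lower name) || PySem.Str.isIn "data" (PySem.Str.lower description)) = true
  · simp only [h9, Option.map_some]
    rcases Bool.or_eq_true_iff.mp h9 with h' | h' <;> simp only [h', if_true, ite_self]
  rw [Bool.not_eq_true, Bool.or_eq_false_iff] at h9
  simp only [h9.1, h9.2, Bool.false_eq_true, if_false, Bool.false_or]
  by_cases h10 : (PySem.Str.isIn "file" (PySem.Str.lower name) || PySem.Str.isIn "file" (PySem.Str.lower description)) = true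
  · simp only [h10, Option.map_some]
    rcases Bool.or_eq_true_iff.mp h10 with h' | h' <;> simp only [h', if_true, ite_self]
  rw [Bool.not_eq_true, Bool.or_eq_false_iff] at h10
  simp only [h10.1, h10.2, Bool.false_eq_true, if_false, Bool.false_or]
  by_cases h11 : (PySem.Str.isIn "object" (PySem.Str.lower name) || PySem.Str.isIn "object" (PySem.Str.lower description)) = true
  · simp only [h11, Option.map_some]
    rcases Bool.or_eq_true_iff.mp h11 with h' | h' <;> simp only [h', if_true, ite_self]
  rw [Bool.not_eq_true, Bool.or_eq_false_iff] at h11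
  simp only [h11.1, h11.2, Bool.false_eq_true, if_false, Bool.false_or]
  by_cases h12 : (PySem.Str.isIn "workflow" (PySem.Str.lower name) || PySem.Str.isIn "workflow" (PySem.Str.lower description)) = true
  · simp only [h12, Option.map_some]
    rcases Bool.or_eq_true_iff.mp h12 with h' | h' <;> simp only [h', if_true, ite_self]
  rw [Bool.not_eq_true, Bool.or_eq_false_iff] at h12
  simp only [h12.1, h12.2, Bool.false_eq_true, if_false, Bool.false_or]
  by_cases h13 : (PySem.Str.isIn "execution" (PySem.Str.lower name) || PySem.Str.isIn "execution" (PySem.Str.lower description)) = true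
  · simp only [h13, Option.map_some]
    rcases Bool.or_eq_true_iff.mp h13 with h' | h' <;> simp only [h', if_true, ite_self]
  rw [Bool.not_eq_true, Bool.or_eq_false_iff] at h13
  simp only [h13.1, h13.2, Bool.false_eq_true, if_false, Bool.false_or]
  by_cases h14 : (PySem.Str.isIn "activity" (PySem.Str.lower name) || PySem.Str.isIn "activity" (PySem.Str.lower description)) = true
  · simp only [h14, Option.map_some]
    rcases Bool.or_eq_true_iff.mp h14 with h' | h' <;> simp only [h', if_true, ite_self]
  rw [Bool.not_eq_true, Bool.or_eq_false_iff] at h14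
  simp only [h14.1, h14.2, Bool.false_eq_true, if_false, Bool.false_or]
  by_cases h15 : (PySem.Str.isIn "process" (PySem.Str.lower name) || PySem.Str.isIn "process" (PySem.Str.lower description)) = true
  · simp only [h15, Option.map_some]
    rcases Bool.or_eq_true_iff.mp h15 with h' | h' <;> simp only [h', if_true, ite_self]
  rw [Bool.not_eq_true, Bool.or_eq_false_iff] at h15
  simp only [h15.1, h15.2, Bool.false_eq_true, if_false, Bool.false_or]
  by_cases h16 : (PySem.Str.isIn "annotation" (PySem.Str.lower name) || PySem.Str.isIn "annotation" (PySem.Str.lower description)) = true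
  · simp only [h16, Option.map_some]
    rcases Bool.or_eq_true_iff.mp h16 with h' | h' <;> simp only [h', if_true, ite_self]
  rw [Bool.not_eq_true, Bool.or_eq_false_iff] at h16
  simp only [h16.1, h16.2, Bool.false_eq_true, if_false, Bool.false_or]
  by_cases h17 : (PySem.Str.isIn "feature" (PySem.Str.lower name) || PySem.Str.isIn "feature" (PySem.Str.lower description)) = true
  · simp only [h17, Option.map_some]
    rcases Bool.or_eq_true_iff.mp h17 with h' | h' <;> simp only [h', if_true, ite_self]
  rw [Bool.not_eq_true, Bool.or_eq_false_iff] at h17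
  simp only [h17.1, h17.2, Bool.false_eq_true, if_false, Bool.false_or]
  by_cases h18 : (PySem.Str.isIn "person" (PySem.Str.lower name) || PySem.Str.isIn "person" (PySem.Str.lower description)) = true
  · simp only [h18, Option.map_some]
    rcases Bool.or_eq_true_iff.mp h18 with h' | h' <;> simp only [h', if_true, ite_self]
  rw [Bool.not_eq_true, Bool.or_eq_false_iff] at h18
  simp only [h18.1, h18.2, Bool.false_eq_true, if_false, Bool.false_or]
  by_cases h19 : (PySem.Str.isIn "user" (PySem.Str.lower name) || PySem.Str.isIn "user" (PySem.Str.lower description)) = true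
  · simp only [h19, Option.map_some]
    rcases Bool.or_eq_true_iff.mp h19 with h' | h' <;> simp only [h', if_true, ite_self]
  rw [Bool.not_eq_true, Bool.or_eq_false_iff] at h19
  simp only [h19.1, h19.2, Bool.false_eq_true, if_false, Bool.false_or]
  by_cases h20 : (PySem.Str.isIn "contact" (PySem.Str.lower name) || PySem.Str.isIn "contact" (PySem.Str.lower description)) = true
  · simp only [h20, Option.map_some]
    rcases Bool.or_eq_true_iff.mp h20 with h' | h' <;> simp only [h', if_true, ite_self]
  rw [Bool.not_eq_true, Bool.or_eq_false_iff] at h20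
  simp only [h20.1, h20.2, Bool.false_eq_true, if_false, Bool.false_or]
  by_cases h21 : (PySem.Str.isIn "instrument" (PySem.Str.lower name) || PySem.Str.isIn "instrument" (PySem.Str.lower description)) = true
  · simp only [h21, Option.map_some]
    rcases Bool.or_eq_true_iff.mp h21 with h' | h' <;> simp only [h', if_true, ite_self]
  rw [Bool.not_eq_true, Bool.or_eq_false_iff] at h21
  simp only [h21.1, h21.2, Bool.false_eq_true, if_false, Bool.false_or]
  by_cases h22 : (PySem.Str.isIn "device" (PySem.Str.lower name) || PySem.Str.isIn "device" (PySem.Str.lower description)) = true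
  · simp only [h22, Option.map_some]
    rcases Bool.or_eq_true_iff.mp h22 with h' | h' <;> simp only [h', if_true, ite_self]
  rw [Bool.not_eq_true, Bool.or_eq_false_iff] at h22
  simp only [h22.1, h22.2, Bool.false_eq_true, if_false, Bool.false_or]
  by_cases h23 : (PySem.Str.isIn "equipment" (PySem.Str.lower name) || PySem.Str.isIn "equipment" (PySem.Str.lower description)) = true
  · simp only [h23, Option.map_some]
    rcases Bool.or_eq_true_iff.mp h23 with h' | h' <;> simp only [h', if_true, ite_self]
  rw [Bool.not_eq_true, Bool.or_eq_false_iff] at h23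
  simp only [h23.1, h23.2, Bool.false_eq_true, if_false, Bool.false_or]
  by_cases h24 : PySem.Str.isIn "protocol" (PySem.Str.lower name) = true
  · simp only [h24, if_true, Option.map_some]
  rw [Bool.not_eq_true] at h24
  simp only [h24, Bool.false_eq_true, if_false, Bool.false_or]
  by_cases h25 : PySem.Str.isIn "method" (PySem.Str.lower name) = true
  · simp only [h25, if_true, Option.map_some]
  rw [Bool.not_eq_true] at h25
  simp only [h25, Bool.false_eq_true, if_false, Bool.false_or]
  by_cases h26 : PySem.Str.isIn "procedure" (PySem.Str.lower name) = true
  · simp only [h26, if_true, Option.map_some]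
  rw [Bool.not_eq_true] at h26
  simp only [h26, Bool.false_eq_true, if_false, Bool.false_or]
  rfl
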